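-- pv_equiv track=rewrite | github.com/sri-chakravarthy/el-wifi-automation | src/WifiAutomations.py | deduplicate_device_ids_by_severity
-- ===== SOURCE A (Python) =====
-- def deduplicate_device_ids_by_severity(alert_dict):
--     # Define severity levels from least to most severe
--     severity_order = [
--         'CLEAR', 'DEBUG', 'INFO', 'NOTICE', 'WARNING', 'ERROR',
--         'CRITICAL', 'ALERT', 'EMERGENCY'
--     ]
--
--     # Create a set to track device IDs already seen at higher severities
--     seen_devices = set()
--
--     # Traverse from highest to lowest severity
--     for severity in reversed(severity_order):
--         devices = alert_dict.get(severity, set())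
--         # Remove devices already seen in higher severities
--         alert_dict[severity] = devices - seen_devices
--         # Add current devices to seen
--         seen_devices.update(alert_dict[severity])
--
--     return alert_dict
-- ===== SOURCE B (Python) =====
-- def deduplicate_device_ids_by_severity(alert_dict):
--     # Two-pass alternative: index each device's highest severity rank, then filter.
--     severity_order = [
--         'CLEAR', 'DEBUG', 'INFO', 'NOTICE', 'WARNING', 'ERROR',
--         'CRITICAL', 'ALERT', 'EMERGENCY'
--     ]
--     # First pass: highest rank at which each device appears (later ranks overwrite).
--     maxrank = {}
--     for rank, severity in enumerate(severity_order):
--         for device in alert_dict.get(severity, set()):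
--             maxrank[device] = rank
--     # Second pass: keep a device only at its highest rank; walk from the top so
--     # severities missing from the dict are inserted in the same order as before.
--     for rank, severity in reversed(list(enumerate(severity_order))):
--         alert_dict[severity] = {device for device in alert_dict.get(severity, set())
--                                 if maxrank[device] == rank}
--     return alert_dict
-- ===== Notes on version B (the rewrite author's own statement) =====
-- stated objective: alternative
-- what changed: Replaces the single high-to-low accumulating scan (seen-set subtracted at each severity) by a two-pass index: first build a dict mapping each device to the highest severity rank it appears at, then filter every severity's set to the devices whose max rank is that severity.
import Mathlib
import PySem

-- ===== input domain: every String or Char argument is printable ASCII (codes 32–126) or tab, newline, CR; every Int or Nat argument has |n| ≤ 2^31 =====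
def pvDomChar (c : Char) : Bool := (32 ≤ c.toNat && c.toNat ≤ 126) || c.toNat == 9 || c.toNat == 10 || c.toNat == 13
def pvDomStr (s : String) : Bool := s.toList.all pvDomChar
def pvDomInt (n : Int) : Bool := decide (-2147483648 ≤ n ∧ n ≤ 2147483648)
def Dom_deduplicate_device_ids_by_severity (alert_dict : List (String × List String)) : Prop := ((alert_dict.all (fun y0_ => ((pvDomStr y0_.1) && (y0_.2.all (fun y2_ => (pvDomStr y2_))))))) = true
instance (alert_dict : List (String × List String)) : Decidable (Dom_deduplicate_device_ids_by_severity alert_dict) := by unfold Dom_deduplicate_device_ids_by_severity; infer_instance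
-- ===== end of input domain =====

-- B is an alternative two-pass algorithm (index of max ranks, then filter); same cost as A.
-- Both the Python A and the Python B mutate and return alert_dict; the equivalence here is about the returned value.
def pvSevOrder : List String :=
  ["CLEAR", "DEBUG", "INFO", "NOTICE", "WARNING", "ERROR", "CRITICAL", "ALERT", "EMERGENCY"]

-- ===== PORT A =====
def deduplicate_device_ids_by_severity (alert_dict : List (String × List String)) : List (String × List String) :=
  let d0 : PySem.Dict String (List String) := PySem.Dict.mk alert_dict
  let res := pvSevOrder.reverse.foldl
    (fun (st : PySem.Dict String (List String) × PySem.Set String) severity =>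
      let devices := st.1.getD severity PySem.Set.empty
      let kept := PySem.Set.diff devices st.2
      (st.1.insert severity kept, PySem.Set.update st.2 kept))
    (d0, PySem.Set.empty)
  res.1.items

-- ===== PORT B =====
def deduplicate_device_ids_by_severity_alt (alert_dict : List (String × List String)) : List (String × List String) :=
  let d0 : PySem.Dict String (List String) := PySem.Dict.mk alert_dict
  let maxrank : PySem.Dict String Int :=
    (PySem.List.enumerate pvSevOrder).foldl
      (fun m p => (d0.getD p.2 PySem.Set.empty).foldl (fun m device => m.insert device p.1) m)
      PySem.Dict.empty
  let res := (PySem.List.enumerate pvSevOrder).reverse.foldl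
    (fun d p =>
      d.insert p.2 (PySem.Set.ofList ((d.getD p.2 PySem.Set.empty).filter
        (fun device => maxrank.getD device (-1) == p.1))))
    d0
  res.items

-- ===== PRECONDITION & SPEC =====
-- Pre_ is the encoding invariant of the Python type dict[str, set[str]]: a Python dict
-- cannot carry duplicate keys and a Python set cannot carry duplicate elements, so the
-- association list has Nodup keys and each value list has Nodup elements; no input A
-- accepts is excluded.
def Pre_deduplicate_device_ids_by_severity (alert_dict : List (String × List String)) : Prop :=
  (alert_dict.map Prod.fst).Nodup ∧ ∀ p ∈ alert_dict, p.2.Nodup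
instance (alert_dict : List (String × List String)) : Decidable (Pre_deduplicate_device_ids_by_severity alert_dict) := by
  unfold Pre_deduplicate_device_ids_by_severity; infer_instance

def pvWitness_deduplicate_device_ids_by_severity : (List (String × List String)) :=
  [("ERROR", ["d1", "d2"]), ("INFO", ["d1"]), ("misc", ["x"])]

def Spec_deduplicate_device_ids_by_severity (alert_dict : List (String × List String)) (out : List (String × List String)) : Prop := out = deduplicate_device_ids_by_severity_alt alert_dict
instance (alert_dict : List (String × List String)) (out : List (String × List String)) : Decidable (Spec_deduplicate_device_ids_by_severity alert_dict out) := by unfold Spec_deduplicate_device_ids_by_severity; infer_instance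

-- ===== CLAIM (what is proved, stated in full; the proofs are below) =====
def Claim_equal_deduplicate_device_ids_by_severity : Prop := ∀ (alert_dict : List (String × List String)), Dom_deduplicate_device_ids_by_severity alert_dict → Pre_deduplicate_device_ids_by_severity alert_dict → Spec_deduplicate_device_ids_by_severity alert_dict (deduplicate_device_ids_by_severity alert_dict)

-- ===== LEMMAS AND PROOFS =====

-- proof-only helpers: the per-severity values A resp. B store, read off from the input dict
def pvSpecA (g : String → List String) : List String → PySem.Set String → List (String × List String)
  | [], _ => []
  | s :: t, seen =>
      (s, PySem.Set.diff (g s) seen) :: pvSpecA g t (seen.update (PySem.Set.diff (g s) seen))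

def pvSpecB (g : String → List String) (M : PySem.Dict String Int) : List (Int × String) → List (String × List String)
  | [] => []
  | p :: t =>
      (p.2, PySem.Set.ofList ((g p.2).filter (fun device => M.getD device (-1) == p.1))) :: pvSpecB g M t

theorem pvGetD_empty {ν : Type} (x : String) (d0 : ν) : (PySem.Dict.empty).getD x d0 = d0 := rfl

-- values read out of the input dict are duplicate-free when every stored value is
theorem pvGetD_nodup (l : List (String × List String)) (h : ∀ p ∈ l, p.2.Nodup) (s : String) :
    ((PySem.Dict.mk l).getD s PySem.Set.empty).Nodup := by
  induction l with
  | nil => simp [PySem.Dict.getD, PySem.Dict.get?, PySem.Set.empty]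
  | cons p t ih =>
      simp only [PySem.Dict.getD, PySem.Dict.get?]
      by_cases hb : (p.1 == s) = true
      · rw [List.find?_cons_of_pos (p := fun (q : String × List String) => q.1 == s) hb]
        simpa using h p (List.mem_cons_self ..)
      · rw [List.find?_cons_of_neg (p := fun (q : String × List String) => q.1 == s) hb]
        simpa only [PySem.Dict.getD, PySem.Dict.get?] using
          ih (fun q hq => h q (List.mem_cons_of_mem _ hq))

-- getD through the inner maxrank loop (all devices of one severity get rank r)
theorem pvMaxrankInner (l : List String) (m : PySem.Dict String Int) (r : Int) (x : String) :
    ((l.foldl (fun m device => m.insert device r) m).getD x (-1)) =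
      if x ∈ l then r else m.getD x (-1) := by
  induction l generalizing m with
  | nil => simp
  | cons a t ih =>
      simp only [List.foldl_cons, ih, PySem.Dict.getD_insert, List.mem_cons]
      by_cases h1 : x ∈ t <;> by_cases h2 : x = a <;> simp [h1, h2]

-- A's accumulating loop, with the dict reads replaced by reads from the initial dict
theorem pvFoldA (g : String → List String) (l : List String) (d : PySem.Dict String (List String))
    (seen : PySem.Set String) (hnd : l.Nodup)
    (hread : ∀ s ∈ l, d.getD s PySem.Set.empty = g s) :
    (l.foldl (fun (st : PySem.Dict String (List String) × PySem.Set String) severity =>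
        (st.1.insert severity (PySem.Set.diff (st.1.getD severity PySem.Set.empty) st.2),
         PySem.Set.update st.2 (PySem.Set.diff (st.1.getD severity PySem.Set.empty) st.2)))
      (d, seen)).1
    = (pvSpecA g l seen).foldl (fun d p => d.insert p.1 p.2) d := by
  induction l generalizing d seen with
  | nil => simp [pvSpecA]
  | cons s t ih =>
      simp only [List.foldl_cons, pvSpecA]
      rw [hread s (List.mem_cons_self ..)]
      exact ih (d.insert s (PySem.Set.diff (g s) seen))
        (seen.update (PySem.Set.diff (g s) seen)) hnd.of_cons
        (fun s' hs' => by
          rw [PySem.Dict.getD_insert]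
          have : ¬ s' = s := fun h => (List.nodup_cons.mp hnd).1 (h ▸ hs')
          rw [if_neg this]
          exact hread s' (List.mem_cons_of_mem _ hs'))

-- B's filtering loop, with the dict reads replaced by reads from the initial dict
theorem pvFoldB (g : String → List String) (M : PySem.Dict String Int) (l : List (Int × String))
    (d : PySem.Dict String (List String)) (hnd : (l.map Prod.snd).Nodup)
    (hread : ∀ p ∈ l, d.getD p.2 PySem.Set.empty = g p.2) :
    l.foldl (fun d p =>
        d.insert p.2 (PySem.Set.ofList ((d.getD p.2 PySem.Set.empty).filter
          (fun device => M.getD device (-1) == p.1)))) d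
    = (pvSpecB g M l).foldl (fun d p => d.insert p.1 p.2) d := by
  induction l generalizing d with
  | nil => simp [pvSpecB]
  | cons p t ih =>
      simp only [List.foldl_cons, pvSpecB]
      rw [hread p (List.mem_cons_self ..)]
      rw [List.map_cons] at hnd
      obtain ⟨hnotin, htail⟩ := List.nodup_cons.mp hnd
      refine ih _ htail
        (fun q hq => by
          rw [PySem.Dict.getD_insert]
          have hne : ¬ q.2 = p.2 := fun h =>
            hnotin (h ▸ List.mem_map_of_mem (f := Prod.snd) hq)
          rw [if_neg hne]
          exact hread q (List.mem_cons_of_mem _ hq))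

-- invariant carried through the severities: what M must say at each step
def pvHM (g : String → List String) (M : PySem.Dict String Int) : List String → List (Int × String) → Prop
  | _, [] => True
  | hi, p :: t =>
      (∀ x ∈ g p.2, (M.getD x (-1) = p.1 ↔ ∀ s' ∈ hi, x ∉ g s')) ∧ pvHM g M (hi ++ [p.2]) t

-- the per-step values of A's loop and of B's second pass coincide
theorem pvSpecEq (g : String → List String) (M : PySem.Dict String Int)
    (hgnd : ∀ s, (g s).Nodup) :
    ∀ (l : List (Int × String)) (hi : List String) (seen : PySem.Set String),
      (∀ x, x ∈ seen ↔ ∃ s' ∈ hi, x ∈ g s') →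
      pvHM g M hi l →
      pvSpecA g (l.map Prod.snd) seen = pvSpecB g M l := by
  intro l
  induction l with
  | nil => intro hi seen _ _; rfl
  | cons p t ih =>
      intro hi seen Hseen HM
      obtain ⟨H1, H2⟩ := HM
      simp only [List.map_cons, pvSpecA, pvSpecB]
      have hkept : PySem.Set.diff (g p.2) seen
          = PySem.Set.ofList ((g p.2).filter (fun device => M.getD device (-1) == p.1)) := by
        rw [PySem.Set.ofList_eq_self_of_nodup _ ((hgnd p.2).filter _)]
        show List.filter (fun x => !PySem.Set.contains seen x) (g p.2) = _
        refine List.filter_congr ?_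
        intro x hx
        rw [Bool.eq_iff_iff]
        simp only [Bool.not_eq_true', PySem.Set.contains_eq_decide, decide_eq_false_iff_not,
          beq_iff_eq]
        rw [H1 x hx, Hseen x]
        simp
      rw [hkept]
      refine congrArg (List.cons _) ?_
      rw [← hkept]
      refine ih (hi ++ [p.2]) (seen.update (PySem.Set.diff (g p.2) seen)) ?_ H2
      intro x
      simp only [PySem.Set.mem_update, PySem.Set.mem_diff, Hseen x, List.mem_append,
        List.mem_singleton]
      constructor
      · rintro (⟨s', hs', hx⟩ | ⟨hx, -⟩)
        · exact ⟨s', Or.inl hs', hx⟩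
        · exact ⟨p.2, Or.inr rfl, hx⟩
      · rintro ⟨s', hs' | rfl, hx⟩
        · exact Or.inl ⟨s', hs', hx⟩
        · by_cases hxs : x ∈ seen
          · exact Or.inl ((Hseen x).mp hxs)
          · exact Or.inr ⟨hx, (Hseen x).mpr.mt hxs⟩

-- ===== VERDICT (by name: the statement is the Claim_ definition above) =====
theorem deduplicate_device_ids_by_severity_spec : Claim_equal_deduplicate_device_ids_by_severity := by
  intro alert _hdom hpre
  obtain ⟨hkeys, hvals⟩ := hpre
  unfold Spec_deduplicate_device_ids_by_severity
  unfold deduplicate_device_ids_by_severity deduplicate_device_ids_by_severity_alt pvSevOrder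
  simp only [PySem.List.enumerate, Int.reduceAdd, List.reverse_cons, List.reverse_nil,
    List.nil_append, List.cons_append]
  rw [pvFoldA (fun s => (PySem.Dict.mk alert).getD s PySem.Set.empty) _ _ _ (by decide)
    (fun s _ => rfl)]
  rw [pvFoldB (fun s => (PySem.Dict.mk alert).getD s PySem.Set.empty) _ _ _ (by decide)
    (fun p _ => rfl)]
  have hspec := pvSpecEq (fun s => (PySem.Dict.mk alert).getD s PySem.Set.empty)
    (List.foldl
      (fun m p =>
        List.foldl (fun m device => m.insert device p.1) m
          ((PySem.Dict.mk alert).getD p.2 PySem.Set.empty))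
      PySem.Dict.empty
      [((0 : Int), "CLEAR"), (1, "DEBUG"), (2, "INFO"), (3, "NOTICE"), (4, "WARNING"),
        (5, "ERROR"), (6, "CRITICAL"), (7, "ALERT"), (8, "EMERGENCY")])
    (pvGetD_nodup alert hvals)
    [(8, "EMERGENCY"), (7, "ALERT"), (6, "CRITICAL"), (5, "ERROR"), (4, "WARNING"),
      (3, "NOTICE"), (2, "INFO"), (1, "DEBUG"), (0, "CLEAR")]
    [] PySem.Set.empty (by intro x; simp [PySem.Set.empty])
    ?_
  · simp only [List.map_cons, List.map_nil] at hspec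
    rw [hspec]
  · simp only [pvHM, List.nil_append, List.cons_append, List.foldl_cons, List.foldl_nil]
    refine ⟨?_, ?_, ?_, ?_, ?_, ?_, ?_, ?_, ?_, trivial⟩ <;>
      · intro x hx
        simp only [pvMaxrankInner, pvGetD_empty, List.mem_cons, List.not_mem_nil]
        split_ifs <;> simp_all
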